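-- pv_equiv track=rewrite | github.com/John75SunCity/ssh-git-github.com-odoo-odoo.git-18.0 | development-tools/generate_manifest_data_order.py | render_data_block
-- ===== SOURCE A (Python) =====
-- from typing import Callable, Dict, List, Tuple
--
-- def render_data_block(ordered: List[str]) -> str:
--     lines = []
--     for item in ordered:
--         if item.startswith('#'):
--             lines.append(f"        {item}")
--         else:
--             lines.append(f"        \"{item}\",")
--     # Remove trailing comma from last real file for cleanliness
--     for i in range(len(lines) - 1, -1, -1):
--         if lines[i].strip().startswith('"'):  # pragma: no branch
--             lines[i] = lines[i].rstrip(',')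
--             break
--     return "\n".join(lines)
-- ===== SOURCE B (Python) =====
-- def render_data_block(ordered):
--     # One backward pass with a flag: the first non-comment item seen (i.e. the
--     # last one overall) gets no trailing comma; no fixup scan, no mutation.
--     out = []
--     seen_real = False
--     for item in reversed(ordered):
--         if item.startswith('#'):
--             out.append(f"        {item}")
--         elif seen_real:
--             out.append(f"        \"{item}\",")
--         else:
--             out.append(f"        \"{item}\"")
--             seen_real = True
--     out.reverse()
--     return "\n".join(out)
-- ===== Notes on version B (the rewrite author's own statement) =====
-- stated objective: simpler
-- what changed: Replaced the forward build plus backward fixup scan with in-place string mutation by a single backward pass carrying a seen-real flag, so the last non-comment item is emitted without a comma directly and the list is built back-to-front.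
import Mathlib
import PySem

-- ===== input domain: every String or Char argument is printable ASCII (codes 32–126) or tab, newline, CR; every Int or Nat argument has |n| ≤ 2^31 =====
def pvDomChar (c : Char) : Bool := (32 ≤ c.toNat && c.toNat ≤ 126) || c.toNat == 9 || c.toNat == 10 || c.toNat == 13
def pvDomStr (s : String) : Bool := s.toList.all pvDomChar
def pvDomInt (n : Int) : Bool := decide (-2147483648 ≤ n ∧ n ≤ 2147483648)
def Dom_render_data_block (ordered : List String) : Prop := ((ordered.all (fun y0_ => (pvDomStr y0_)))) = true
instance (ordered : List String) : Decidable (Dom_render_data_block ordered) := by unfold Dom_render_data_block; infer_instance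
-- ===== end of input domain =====

-- B replaces A's forward build + backward comma-fixup scan by one backward pass with a seen-real flag (objective: simpler).

-- ===== PORT A =====
-- exact hand port of s.rstrip(',') : drop every trailing ',' (PySem has no rstrip-with-chars)
def pvRstripComma (s : String) : String :=
  String.ofList ((s.toList.reverse.dropWhile (fun c => c == ',')).reverse)

-- port of A's backward break-scan `for i in range(len(lines)-1,-1,-1): … break`,
-- expressed as structural recursion on the reversed list (first hit from the end is fixed, then stop)
def pvFixRev : List String → List String
  | [] => []
  | l :: rest =>
    if PySem.Str.startswith (PySem.Str.strip l) "\"" then pvRstripComma l :: rest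
    else l :: pvFixRev rest

def render_data_block (ordered : List String) : String :=
  let lines := ordered.foldl (fun acc item =>
    acc ++ [if PySem.Str.startswith item "#" then "        " ++ item
            else "        \"" ++ item ++ "\","]) []
  PySem.Str.join "\n" (pvFixRev lines.reverse).reverse

-- ===== PORT B =====
-- B's backward loop over reversed(ordered) with the seen_real flag
def pvBLoop : List String → Bool → List String
  | [], _ => []
  | item :: rest, seen =>
    if PySem.Str.startswith item "#" then ("        " ++ item) :: pvBLoop rest seen
    else if seen then ("        \"" ++ item ++ "\",") :: pvBLoop rest seen
    else ("        \"" ++ item ++ "\"") :: pvBLoop rest true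

def render_data_block_alt (ordered : List String) : String :=
  PySem.Str.join "\n" (pvBLoop ordered.reverse false).reverse

-- ===== PRECONDITION & SPEC =====
def Spec_render_data_block (ordered : List String) (out : String) : Prop := out = render_data_block_alt ordered
instance (ordered : List String) (out : String) : Decidable (Spec_render_data_block ordered out) := by unfold Spec_render_data_block; infer_instance

-- ===== CLAIM (what is proved, stated in full; the proofs are below) =====
def Claim_equal_render_data_block : Prop := ∀ (ordered : List String), Dom_render_data_block ordered → Spec_render_data_block ordered (render_data_block ordered)

-- ===== LEMMAS AND PROOFS =====
def pvLineOf (item : String) : String :=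
  if PySem.Str.startswith item "#" then "        " ++ item
  else "        \"" ++ item ++ "\","

theorem pv_foldl_map (l : List String) (acc : List String) :
    l.foldl (fun acc item =>
      acc ++ [if PySem.Str.startswith item "#" then "        " ++ item
              else "        \"" ++ item ++ "\","]) acc = acc ++ l.map pvLineOf := by
  induction l generalizing acc with
  | nil => simp
  | cons x xs ih =>
    rw [List.foldl_cons, ih, List.map_cons, pvLineOf]
    simp only [List.append_assoc, List.singleton_append]

theorem pv_bloop_true (l : List String) : pvBLoop l true = l.map pvLineOf := by
  induction l with
  | nil => rfl
  | cons x xs ih =>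
    rw [List.map_cons, pvLineOf, pvBLoop, ih]
    split <;> rfl

-- stripping "        " ++ c :: t (c not whitespace) keeps c as head
theorem pv_strip_head (c : Char) (t : List Char) (hc : PySem.Chars.isspace c = false) :
    ∃ u, PySem.Chars.strip ("        ".toList ++ c :: t) = c :: u := by
  have h8 : "        ".toList.dropWhile PySem.Chars.isspace = [] := by decide
  simp only [PySem.Chars.strip, PySem.Chars.lstrip, PySem.Chars.rstrip]
  rw [List.dropWhile_append, h8]
  simp only [List.isEmpty_nil, if_true, List.dropWhile_cons, hc, Bool.false_eq_true, if_false]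
  rw [List.reverse_cons, List.dropWhile_append]
  by_cases he : (t.reverse.dropWhile PySem.Chars.isspace).isEmpty
  · exact ⟨[], by simp [he, hc]⟩
  · exact ⟨(t.reverse.dropWhile PySem.Chars.isspace).reverse, by simp [he]⟩

-- the stripped comment line starts with '#', not '"'
theorem pv_strip_comment (item : String) (h : PySem.Str.startswith item "#" = true) :
    PySem.Str.startswith (PySem.Str.strip ("        " ++ item)) "\"" = false := by
  have hpre : ['#'] <+: item.toList := by
    simpa [PySem.Str.startswith, PySem.Chars.startswith, List.isPrefixOf_iff_prefix] using h
  rcases hpre with ⟨t, ht⟩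
  have ht' : item.toList = '#' :: t := by simpa using ht.symm
  obtain ⟨u, hu⟩ := pv_strip_head '#' t (by decide)
  simp only [PySem.Str.startswith, PySem.Str.strip, PySem.Chars.startswith,
    String.toList_ofList, String.toList_append]
  rw [ht', hu]
  simp [List.isPrefixOf, show "\"".toList = ['"'] from rfl]

theorem pv_quoted_toList (item : String) :
    ("        \"" ++ item ++ "\",").toList
      = "        ".toList ++ '"' :: (item.toList ++ ['"', ',']) := by
  simp [String.toList_append]

-- the stripped quoted line starts with '"'
theorem pv_strip_quoted (item : String) :
    PySem.Str.startswith (PySem.Str.strip ("        \"" ++ item ++ "\",")) "\"" = true := by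
  obtain ⟨u, hu⟩ := pv_strip_head '"' (item.toList ++ ['"', ',']) (by decide)
  simp only [PySem.Str.startswith, PySem.Str.strip, PySem.Chars.startswith,
    String.toList_ofList, pv_quoted_toList, hu]
  simp [List.isPrefixOf, show "\"".toList = ['"'] from rfl]

-- rstrip(',') on a quoted line drops exactly the one trailing comma
theorem pv_rstrip_quoted (item : String) :
    pvRstripComma ("        \"" ++ item ++ "\",") = "        \"" ++ item ++ "\"" := by
  unfold pvRstripComma
  have h1 : ("        \"" ++ item ++ "\",").toList.reverse
      = ',' :: '"' :: ("        \"" ++ item).toList.reverse := by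
    simp [String.toList_append]
  rw [h1, List.dropWhile_cons]
  simp only [beq_self_eq_true, if_true, List.dropWhile_cons,
    show (('"' : Char) == ',') = false from rfl, Bool.false_eq_true, if_false]
  have h2 : ('"' :: ("        \"" ++ item).toList.reverse).reverse
      = ("        \"" ++ item ++ "\"").toList := by
    simp [String.toList_append]
  rw [h2, String.ofList_toList]

theorem pv_fix_eq_bloop (r : List String) : pvFixRev (r.map pvLineOf) = pvBLoop r false := by
  induction r with
  | nil => rfl
  | cons x xs ih =>
    by_cases h : PySem.Str.startswith x "#" = true
    · rw [List.map_cons, pvLineOf, if_pos h, pvFixRev,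
        if_neg (by simp only [pv_strip_comment x h]; simp), ih, pvBLoop, if_pos h]
    · rw [List.map_cons, pvLineOf, if_neg h, pvFixRev, if_pos (pv_strip_quoted x),
        pv_rstrip_quoted, pvBLoop, if_neg h, if_neg (by simp), pv_bloop_true]

-- ===== VERDICT (by name: the statement is the Claim_ definition above) =====
theorem render_data_block_spec : Claim_equal_render_data_block := by
  intro ordered _
  show render_data_block ordered = render_data_block_alt ordered
  unfold render_data_block render_data_block_alt
  rw [pv_foldl_map, List.nil_append]
  show PySem.Str.join "\n" (pvFixRev (List.map pvLineOf ordered).reverse).reverse = _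
  rw [← List.map_reverse, pv_fix_eq_bloop]
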